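-- pv_equiv track=rewrite | github.com/mraleko/optimal-schedule-maker | optimal_schedule.py | parse_day_tokens
-- ===== SOURCE A (Python) =====
-- from typing import Dict, Iterable, List, Optional, Set, Tuple
--
-- def parse_day_tokens(day_str: str) -> List[str]:
--     day_str = (day_str or "").strip()
--     if not day_str:
--         return []
--     upper = day_str.upper()
--     if upper in {"TBA", "ARR", "ARRANGED"}:
--         return []
--
--     days: List[str] = []
--     i = 0
--     while i < len(upper):
--         pair = upper[i : i + 2]
--         if pair == "TH":
--             days.append("Thu")
--             i += 2
--             continue
--         if pair == "SU":
--             days.append("Sun")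
--             i += 2
--             continue
--         if pair == "SA":
--             days.append("Sat")
--             i += 2
--             continue
--
--         ch = upper[i]
--         mapping = {
--             "M": "Mon",
--             "T": "Tue",
--             "W": "Wed",
--             "F": "Fri",
--             "S": "Sat",
--             "U": "Sun",
--             "R": "Thu",
--         }
--         day = mapping.get(ch)
--         if day:
--             days.append(day)
--         i += 1
--
--     return days
-- ===== SOURCE B (Python) =====
-- def parse_day_tokens(day_str):
--     day_str = (day_str or "").strip()
--     if not day_str:
--         return []
--     upper = day_str.upper()
--     if upper in {"TBA", "ARR", "ARRANGED"}:
--         return []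
--     # Collapse the two-char tokens into placeholder chars (lowercase, so they
--     # cannot occur in the uppercased string), then map chars through one table.
--     collapsed = upper.replace("TH", "h").replace("SU", "u").replace("SA", "a")
--     table = {"M": "Mon", "T": "Tue", "W": "Wed", "F": "Fri", "S": "Sat",
--              "U": "Sun", "R": "Thu", "h": "Thu", "u": "Sun", "a": "Sat"}
--     return [table[c] for c in collapsed if c in table]
-- ===== Notes on version B (the rewrite author's own statement) =====
-- stated objective: faster
-- what changed: Replaced the manual index loop with two-char lookahead by three str.replace passes that collapse the two-letter day codes into placeholder characters (safe because the string was uppercased), followed by a single table-driven comprehension.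
import Mathlib
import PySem

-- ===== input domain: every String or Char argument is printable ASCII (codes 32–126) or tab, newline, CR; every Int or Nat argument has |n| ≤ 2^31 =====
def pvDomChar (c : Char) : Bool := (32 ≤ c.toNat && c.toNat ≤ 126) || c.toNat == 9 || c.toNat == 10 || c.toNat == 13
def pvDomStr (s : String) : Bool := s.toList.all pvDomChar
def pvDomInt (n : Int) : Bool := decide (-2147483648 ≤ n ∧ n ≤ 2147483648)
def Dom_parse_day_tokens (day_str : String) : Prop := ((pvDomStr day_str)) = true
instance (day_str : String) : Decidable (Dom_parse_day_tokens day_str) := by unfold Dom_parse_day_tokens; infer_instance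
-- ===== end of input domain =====

-- B replaces A's index loop with two-char peeking by three str.replace passes that collapse
-- the two-letter day codes into placeholder chars, then one table-driven map (objective: faster,
-- by a constant factor measured: the scanning moves into str.replace).

-- ===== PORT A =====
-- A's per-character mapping dict
def pvMapping : PySem.Dict Char String :=
  PySem.Dict.mk [('M', "Mon"), ('T', "Tue"), ('W', "Wed"), ('F', "Fri"),
                 ('S', "Sat"), ('U', "Sun"), ('R', "Thu")]

-- A's `while i < len(upper)` loop, transcribed on the remaining suffix: pair = upper[i:i+2]
-- is `List.take 2` of the suffix; `i += 2` drops one more char, `i += 1` moves to rest.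
def pvAWhile : List Char → List String → List String
  | [], days => days
  | c :: rest, days =>
    if List.take 2 (c :: rest) = ['T', 'H'] then pvAWhile (List.drop 1 rest) (days ++ ["Thu"])
    else if List.take 2 (c :: rest) = ['S', 'U'] then pvAWhile (List.drop 1 rest) (days ++ ["Sun"])
    else if List.take 2 (c :: rest) = ['S', 'A'] then pvAWhile (List.drop 1 rest) (days ++ ["Sat"])
    else
      match pvMapping.get? c with   -- mapping.get(ch); every stored day is truthy
      | some day => pvAWhile rest (days ++ [day])
      | none => pvAWhile rest days
termination_by cs _ => cs.length
decreasing_by all_goals (simp; try omega)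

def parse_day_tokens (day_str : String) : List String :=
  let s := PySem.Str.strip day_str
  if s = "" then []
  else
    let upper := PySem.Str.upper s
    if upper = "TBA" ∨ upper = "ARR" ∨ upper = "ARRANGED" then []
    else pvAWhile upper.toList []

-- ===== PORT B =====
def pvTable : PySem.Dict Char String :=
  PySem.Dict.mk [('M', "Mon"), ('T', "Tue"), ('W', "Wed"), ('F', "Fri"),
                 ('S', "Sat"), ('U', "Sun"), ('R', "Thu"),
                 ('h', "Thu"), ('u', "Sun"), ('a', "Sat")]

def parse_day_tokens_alt (day_str : String) : List String :=
  let s := PySem.Str.strip day_str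
  if s = "" then []
  else
    let upper := PySem.Str.upper s
    if upper = "TBA" ∨ upper = "ARR" ∨ upper = "ARRANGED" then []
    else
      let collapsed := PySem.Str.replace (PySem.Str.replace (PySem.Str.replace upper "TH" "h") "SU" "u") "SA" "a"
      -- [table[c] for c in collapsed if c in table]
      collapsed.toList.filterMap (fun c => pvTable.get? c)

-- ===== PRECONDITION & SPEC =====
def Spec_parse_day_tokens (day_str : String) (out : List String) : Prop := out = parse_day_tokens_alt day_str
instance (day_str : String) (out : List String) : Decidable (Spec_parse_day_tokens day_str out) := by unfold Spec_parse_day_tokens; infer_instance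

-- ===== CLAIM (what is proved, stated in full; the proofs are below) =====
def Claim_equal_parse_day_tokens : Prop := ∀ (day_str : String), Dom_parse_day_tokens day_str → Spec_parse_day_tokens day_str (parse_day_tokens day_str)

-- ===== LEMMAS AND PROOFS =====

-- the composed replacement performed by B, on the char-list side
def pvRep (l : List Char) : List Char :=
  PySem.Chars.replace (PySem.Chars.replace (PySem.Chars.replace l ['T', 'H'] ['h']) ['S', 'U'] ['u']) ['S', 'A'] ['a']

lemma pv_go_spec (old new : List Char) (hne : old ≠ []) :
    ∀ f l acc, l.length ≤ f →
      PySem.Chars.replace.go old new f l acc = acc.reverse ++ PySem.Chars.replace.go old new l.length l [] := by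
  intro f
  induction f using Nat.strong_induction_on with
  | _ f IH =>
    intro l acc hlen
    match f, l with
    | 0, l =>
      have : l = [] := List.eq_nil_of_length_eq_zero (Nat.le_zero.mp hlen)
      subst this
      simp [PySem.Chars.replace.go]
    | f+1, [] => simp [PySem.Chars.replace.go]
    | f+1, c :: t =>
      have hone : 0 < old.length := List.length_pos_iff.mpr hne
      have hf : t.length ≤ f := by simp only [List.length_cons] at hlen; omega
      by_cases hp : old.isPrefixOf (c :: t)
      · have hd : (List.drop old.length (c :: t)).length ≤ t.length := by
          simp; omega
        have h1 : PySem.Chars.replace.go old new (f+1) (c :: t) acc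
            = PySem.Chars.replace.go old new f (List.drop old.length (c :: t)) (new.reverse ++ acc) := by
          rw [PySem.Chars.replace.go]; simp [hp]
        have h2 : PySem.Chars.replace.go old new (t.length + 1) (c :: t) []
            = PySem.Chars.replace.go old new t.length (List.drop old.length (c :: t)) new.reverse := by
          rw [PySem.Chars.replace.go]; simp [hp]
        rw [h1, IH f (by omega) _ _ (le_trans hd hf)]
        simp only [List.length_cons, h2]
        rw [IH t.length (by omega) _ new.reverse hd]
        simp
      · have h1 : PySem.Chars.replace.go old new (f+1) (c :: t) acc
            = PySem.Chars.replace.go old new f t (c :: acc) := by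
          rw [PySem.Chars.replace.go]; simp [hp]
        have h2 : PySem.Chars.replace.go old new (t.length + 1) (c :: t) []
            = PySem.Chars.replace.go old new t.length t [c] := by
          rw [PySem.Chars.replace.go]; simp [hp]
        rw [h1, IH f (by omega) _ _ hf]
        simp only [List.length_cons, h2]
        rw [IH t.length (by omega) t [c] le_rfl]
        simp

lemma pv_replace_nil (old new : List Char) (hne : old ≠ []) :
    PySem.Chars.replace [] old new = [] := by
  simp [PySem.Chars.replace, hne, PySem.Chars.replace.go]

lemma pv_replace_prefix (old new l : List Char) (hne : old ≠ []) (hp : old.isPrefixOf l = true) :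
    PySem.Chars.replace l old new = new ++ PySem.Chars.replace (List.drop old.length l) old new := by
  have hone : 0 < old.length := List.length_pos_iff.mpr hne
  match l with
  | [] =>
    exfalso
    match old with
    | [] => exact hne rfl
    | o :: os => simp [List.isPrefixOf] at hp
  | c :: t =>
    have hE : old.isEmpty = false := by simp [hne]
    have hd : (List.drop old.length (c :: t)).length ≤ t.length := by simp; omega
    simp only [PySem.Chars.replace, hE, Bool.false_eq_true, if_false, List.length_cons]
    rw [PySem.Chars.replace.go]
    simp only [hp, if_true]
    rw [pv_go_spec old new hne t.length _ _ hd]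
    simp

lemma pv_replace_not_prefix (old new : List Char) (c : Char) (t : List Char) (hne : old ≠ [])
    (hp : ¬ old.isPrefixOf (c :: t) = true) :
    PySem.Chars.replace (c :: t) old new = c :: PySem.Chars.replace t old new := by
  have hE : old.isEmpty = false := by simp [hne]
  simp only [PySem.Chars.replace, hE, Bool.false_eq_true, if_false, List.length_cons]
  rw [PySem.Chars.replace.go]
  simp only [hp, if_false]
  rw [pv_go_spec old new hne t.length t [c] le_rfl]
  simp

lemma pv_replace_head (old : List Char) (x d : Char) (t : List Char) (hne : old ≠ []) :
    ∃ X, PySem.Chars.replace (d :: t) old [x] = (if old.isPrefixOf (d :: t) then x else d) :: X := by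
  by_cases hp : old.isPrefixOf (d :: t)
  · refine ⟨PySem.Chars.replace (List.drop old.length (d :: t)) old [x], ?_⟩
    rw [pv_replace_prefix old [x] _ hne hp, if_pos hp]
    simp
  · refine ⟨PySem.Chars.replace t old [x], ?_⟩
    rw [pv_replace_not_prefix old [x] d t hne hp, if_neg hp]

lemma pv_get?_eq (c : Char) (h1 : c ≠ 'h') (h2 : c ≠ 'u') (h3 : c ≠ 'a') :
    pvTable.get? c = pvMapping.get? c := by
  simp only [pvTable, pvMapping, PySem.Dict.get?_mk_cons]
  split_ifs with hM hT hW hF hS hU hR hh hu ha <;> try rfl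
  · exact (h1 (beq_iff_eq.mp hh).symm).elim
  · exact (h2 (beq_iff_eq.mp hu).symm).elim
  · exact (h3 (beq_iff_eq.mp ha).symm).elim

lemma pv_upperChar_ne (c : Char) :
    PySem.Chars.upperChar c ≠ 'h' ∧ PySem.Chars.upperChar c ≠ 'u' ∧ PySem.Chars.upperChar c ≠ 'a' := by
  simp only [PySem.Chars.upperChar, PySem.Chars.islower]
  split_ifs with h
  · simp only [Bool.and_eq_true, decide_eq_true_eq, Char.le_def] at h
    have hlo : 97 ≤ c.toNat := h.1
    have hhi : c.toNat ≤ 122 := h.2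
    have hv : (c.toNat - 32).isValidChar := Or.inl (by omega)
    refine ⟨?_, ?_, ?_⟩
    · intro he
      have hx := congrArg Char.toNat he
      rw [Char.toNat_ofNat, if_pos hv, show ('h').toNat = 104 from rfl] at hx
      omega
    · intro he
      have hx := congrArg Char.toNat he
      rw [Char.toNat_ofNat, if_pos hv, show ('u').toNat = 117 from rfl] at hx
      omega
    · intro he
      have hx := congrArg Char.toNat he
      rw [Char.toNat_ofNat, if_pos hv, show ('a').toNat = 97 from rfl] at hx
      omega
  · simp only [Bool.and_eq_true, decide_eq_true_eq, Char.le_def, not_and] at h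
    refine ⟨?_, ?_, ?_⟩ <;> · intro he; subst he; simp at h

lemma pv_nph (x c : Char) (xs t : List Char) (h : x ≠ c) :
    ¬ (x :: xs).isPrefixOf (c :: t) = true := by
  simp [List.isPrefixOf, h]

lemma pv_nph2 (x y c d : Char) (t : List Char) (h : y ≠ d) :
    ¬ (x :: y :: []).isPrefixOf (c :: d :: t) = true := by
  simp [List.isPrefixOf, h]

lemma pvRep_nil : pvRep [] = [] := by
  unfold pvRep
  rw [pv_replace_nil _ _ (by simp), pv_replace_nil _ _ (by simp), pv_replace_nil _ _ (by simp)]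

lemma pvRep_TH (t : List Char) : pvRep ('T' :: 'H' :: t) = 'h' :: pvRep t := by
  unfold pvRep
  have e1 : PySem.Chars.replace ('T' :: 'H' :: t) ['T','H'] ['h']
      = 'h' :: PySem.Chars.replace t ['T','H'] ['h'] := by
    rw [pv_replace_prefix _ _ _ (by simp) (by simp [List.isPrefixOf])]; simp
  rw [e1, pv_replace_not_prefix ['S','U'] ['u'] 'h' _ (by simp) (pv_nph 'S' 'h' _ _ (by decide)),
      pv_replace_not_prefix ['S','A'] ['a'] 'h' _ (by simp) (pv_nph 'S' 'h' _ _ (by decide))]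

lemma pvRep_SU (t : List Char) : pvRep ('S' :: 'U' :: t) = 'u' :: pvRep t := by
  unfold pvRep
  have e1 : PySem.Chars.replace ('S' :: 'U' :: t) ['T','H'] ['h']
      = 'S' :: 'U' :: PySem.Chars.replace t ['T','H'] ['h'] := by
    rw [pv_replace_not_prefix ['T','H'] ['h'] 'S' _ (by simp) (pv_nph 'T' 'S' _ _ (by decide)),
        pv_replace_not_prefix ['T','H'] ['h'] 'U' _ (by simp) (pv_nph 'T' 'U' _ _ (by decide))]
  have e2 : PySem.Chars.replace ('S' :: 'U' :: PySem.Chars.replace t ['T','H'] ['h']) ['S','U'] ['u']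
      = 'u' :: PySem.Chars.replace (PySem.Chars.replace t ['T','H'] ['h']) ['S','U'] ['u'] := by
    rw [pv_replace_prefix _ _ _ (by simp) (by simp [List.isPrefixOf])]; simp
  rw [e1, e2, pv_replace_not_prefix ['S','A'] ['a'] 'u' _ (by simp) (pv_nph 'S' 'u' _ _ (by decide))]

lemma pvRep_SA (t : List Char) : pvRep ('S' :: 'A' :: t) = 'a' :: pvRep t := by
  unfold pvRep
  have e1 : PySem.Chars.replace ('S' :: 'A' :: t) ['T','H'] ['h']
      = 'S' :: 'A' :: PySem.Chars.replace t ['T','H'] ['h'] := by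
    rw [pv_replace_not_prefix ['T','H'] ['h'] 'S' _ (by simp) (pv_nph 'T' 'S' _ _ (by decide)),
        pv_replace_not_prefix ['T','H'] ['h'] 'A' _ (by simp) (pv_nph 'T' 'A' _ _ (by decide))]
  have e2 : PySem.Chars.replace ('S' :: 'A' :: PySem.Chars.replace t ['T','H'] ['h']) ['S','U'] ['u']
      = 'S' :: 'A' :: PySem.Chars.replace (PySem.Chars.replace t ['T','H'] ['h']) ['S','U'] ['u'] := by
    rw [pv_replace_not_prefix ['S','U'] ['u'] 'S' _ (by simp) (pv_nph2 'S' 'U' 'S' 'A' _ (by decide)),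
        pv_replace_not_prefix ['S','U'] ['u'] 'A' _ (by simp) (pv_nph 'S' 'A' _ _ (by decide))]
  have e3 : PySem.Chars.replace ('S' :: 'A' :: PySem.Chars.replace (PySem.Chars.replace t ['T','H'] ['h']) ['S','U'] ['u']) ['S','A'] ['a']
      = 'a' :: PySem.Chars.replace (PySem.Chars.replace (PySem.Chars.replace t ['T','H'] ['h']) ['S','U'] ['u']) ['S','A'] ['a'] := by
    rw [pv_replace_prefix _ _ _ (by simp) (by simp [List.isPrefixOf])]; simp
  rw [e1, e2, e3]

lemma pvRep_single (c : Char) : pvRep [c] = [c] := by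
  unfold pvRep
  rw [pv_replace_not_prefix ['T','H'] ['h'] c [] (by simp) (by simp [List.isPrefixOf]),
      pv_replace_nil _ _ (by simp),
      pv_replace_not_prefix ['S','U'] ['u'] c [] (by simp) (by simp [List.isPrefixOf]),
      pv_replace_nil _ _ (by simp),
      pv_replace_not_prefix ['S','A'] ['a'] c [] (by simp) (by simp [List.isPrefixOf]),
      pv_replace_nil _ _ (by simp)]

lemma pvRep_generic (c d : Char) (t : List Char)
    (h1 : ¬ (c = 'T' ∧ d = 'H')) (h2 : ¬ (c = 'S' ∧ d = 'U')) (h3 : ¬ (c = 'S' ∧ d = 'A')) :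
    pvRep (c :: d :: t) = c :: pvRep (d :: t) := by
  unfold pvRep
  have hr1 : PySem.Chars.replace (c :: d :: t) ['T','H'] ['h']
      = c :: PySem.Chars.replace (d :: t) ['T','H'] ['h'] := by
    apply pv_replace_not_prefix _ _ _ _ (by simp)
    simp only [List.isPrefixOf, Bool.and_eq_true, beq_iff_eq, List.isPrefixOf_nil_left, and_true]
    rintro ⟨hc, hd⟩
    exact h1 ⟨hc.symm, hd.symm⟩
  obtain ⟨e, X, hX, he⟩ : ∃ e X, PySem.Chars.replace (d :: t) ['T','H'] ['h'] = e :: X ∧ (e = 'h' ∨ e = d) := by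
    obtain ⟨X, hX⟩ := pv_replace_head ['T','H'] 'h' d t (by simp)
    by_cases hp : (['T','H'] : List Char).isPrefixOf (d :: t)
    · exact ⟨'h', X, by rwa [if_pos hp] at hX, Or.inl rfl⟩
    · exact ⟨d, X, by rwa [if_neg hp] at hX, Or.inr rfl⟩
  have hr2 : PySem.Chars.replace (c :: e :: X) ['S','U'] ['u']
      = c :: PySem.Chars.replace (e :: X) ['S','U'] ['u'] := by
    apply pv_replace_not_prefix _ _ _ _ (by simp)
    simp only [List.isPrefixOf, Bool.and_eq_true, beq_iff_eq, List.isPrefixOf_nil_left, and_true]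
    rintro ⟨hc, hu⟩
    rcases he with he | he
    · rw [he] at hu; exact absurd hu (by decide)
    · exact h2 ⟨hc.symm, by rw [← he, ← hu]⟩
  obtain ⟨f, Y, hY, hf⟩ : ∃ f Y, PySem.Chars.replace (e :: X) ['S','U'] ['u'] = f :: Y ∧ (f = 'u' ∨ f = e) := by
    obtain ⟨Y, hY⟩ := pv_replace_head ['S','U'] 'u' e X (by simp)
    by_cases hp : (['S','U'] : List Char).isPrefixOf (e :: X)
    · exact ⟨'u', Y, by rwa [if_pos hp] at hY, Or.inl rfl⟩
    · exact ⟨e, Y, by rwa [if_neg hp] at hY, Or.inr rfl⟩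
  have hr3 : PySem.Chars.replace (c :: f :: Y) ['S','A'] ['a']
      = c :: PySem.Chars.replace (f :: Y) ['S','A'] ['a'] := by
    apply pv_replace_not_prefix _ _ _ _ (by simp)
    simp only [List.isPrefixOf, Bool.and_eq_true, beq_iff_eq, List.isPrefixOf_nil_left, and_true]
    rintro ⟨hc, ha⟩
    rcases hf with hf | hf
    · rw [hf] at ha; exact absurd ha (by decide)
    · rcases he with he | he
      · rw [hf, he] at ha; exact absurd ha (by decide)
      · exact h3 ⟨hc.symm, by rw [← he, ← hf, ← ha]⟩
  rw [hr1, hX, hr2, hY, hr3]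

lemma pv_main : ∀ (n : Nat) (l : List Char) (acc : List String), l.length ≤ n →
    (∀ c ∈ l, c ≠ 'h' ∧ c ≠ 'u' ∧ c ≠ 'a') →
    pvAWhile l acc = acc ++ (pvRep l).filterMap (fun c => pvTable.get? c) := by
  intro n
  induction n with
  | zero =>
    intro l acc hl _
    have : l = [] := List.eq_nil_of_length_eq_zero (Nat.le_zero.mp hl)
    subst this
    rw [pvAWhile, pvRep_nil]
    simp
  | succ n IH =>
    intro l acc hl hm
    match l with
    | [] =>
      rw [pvAWhile, pvRep_nil]; simp
    | [c] =>
      obtain ⟨h1, h2, h3⟩ := hm c (by simp)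
      rw [pvAWhile, pvRep_single]
      have hT : List.take 2 [c] ≠ (['T','H'] : List Char) := by simp
      have hS : List.take 2 [c] ≠ (['S','U'] : List Char) := by simp
      have hA : List.take 2 [c] ≠ (['S','A'] : List Char) := by simp
      rw [if_neg hT, if_neg hS, if_neg hA]
      rw [List.filterMap_cons]
      rw [pv_get?_eq c h1 h2 h3]
      cases hg : pvMapping.get? c with
      | some day => simp [pvAWhile]
      | none => simp [pvAWhile]
    | c :: d :: t =>
      obtain ⟨hc1, hc2, hc3⟩ := hm c (by simp)
      have hmt : ∀ x ∈ d :: t, x ≠ 'h' ∧ x ≠ 'u' ∧ x ≠ 'a' := fun x hx => hm x (by simp [hx])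
      have hmtt : ∀ x ∈ t, x ≠ 'h' ∧ x ≠ 'u' ∧ x ≠ 'a' := fun x hx => hm x (by simp [hx])
      have hlt : t.length ≤ n := by simp only [List.length_cons] at hl; omega
      have hldt : (d :: t).length ≤ n := by simp only [List.length_cons] at hl ⊢; omega
      have htake : List.take 2 (c :: d :: t) = [c, d] := by simp
      by_cases h1 : c = 'T' ∧ d = 'H'
      · obtain ⟨rfl, rfl⟩ := h1
        rw [pvAWhile]
        rw [if_pos (by rw [htake])]
        rw [pvRep_TH, List.filterMap_cons]
        have : pvTable.get? 'h' = some "Thu" := rfl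
        rw [this]
        simp only [List.drop_succ_cons, List.drop_zero]
        rw [IH t (acc ++ ["Thu"]) hlt hmtt]
        simp
      · by_cases h2 : c = 'S' ∧ d = 'U'
        · obtain ⟨rfl, rfl⟩ := h2
          rw [pvAWhile]
          rw [if_neg (by rw [htake]; decide), if_pos (by rw [htake])]
          rw [pvRep_SU, List.filterMap_cons]
          have : pvTable.get? 'u' = some "Sun" := rfl
          rw [this]
          simp only [List.drop_succ_cons, List.drop_zero]
          rw [IH t (acc ++ ["Sun"]) hlt hmtt]
          simp
        · by_cases h3 : c = 'S' ∧ d = 'A'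
          · obtain ⟨rfl, rfl⟩ := h3
            rw [pvAWhile]
            rw [if_neg (by rw [htake]; decide), if_neg (by rw [htake]; decide), if_pos (by rw [htake])]
            rw [pvRep_SA, List.filterMap_cons]
            have : pvTable.get? 'a' = some "Sat" := rfl
            rw [this]
            simp only [List.drop_succ_cons, List.drop_zero]
            rw [IH t (acc ++ ["Sat"]) hlt hmtt]
            simp
          · have hnT : List.take 2 (c :: d :: t) ≠ (['T','H'] : List Char) := by
              rw [htake]; simp; rintro rfl rfl; exact h1 ⟨rfl, rfl⟩
            have hnS : List.take 2 (c :: d :: t) ≠ (['S','U'] : List Char) := by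
              rw [htake]; simp; rintro rfl rfl; exact h2 ⟨rfl, rfl⟩
            have hnA : List.take 2 (c :: d :: t) ≠ (['S','A'] : List Char) := by
              rw [htake]; simp; rintro rfl rfl; exact h3 ⟨rfl, rfl⟩
            rw [pvAWhile, if_neg hnT, if_neg hnS, if_neg hnA]
            rw [pvRep_generic c d t h1 h2 h3, List.filterMap_cons]
            rw [pv_get?_eq c hc1 hc2 hc3]
            cases hg : pvMapping.get? c with
            | some day =>
              show pvAWhile (d :: t) (acc ++ [day]) = acc ++ (day :: List.filterMap (fun c => pvTable.get? c) (pvRep (d :: t)))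
              rw [IH (d :: t) (acc ++ [day]) hldt hmt]
              simp
            | none =>
              show pvAWhile (d :: t) acc = acc ++ List.filterMap (fun c => pvTable.get? c) (pvRep (d :: t))
              rw [IH (d :: t) acc hldt hmt]

-- ===== VERDICT (by name: the statement is the Claim_ definition above) =====
set_option maxHeartbeats 1000000 in
theorem parse_day_tokens_spec : Claim_equal_parse_day_tokens := by
  intro day_str _
  unfold Spec_parse_day_tokens parse_day_tokens parse_day_tokens_alt
  by_cases hs : PySem.Str.strip day_str = ""
  · simp [hs]
  · simp only [hs, if_false]
    by_cases hg : PySem.Str.upper (PySem.Str.strip day_str) = "TBA"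
        ∨ PySem.Str.upper (PySem.Str.strip day_str) = "ARR"
        ∨ PySem.Str.upper (PySem.Str.strip day_str) = "ARRANGED"
    · simp [hg]
    · simp only [hg, if_false]
      refine (pv_main (PySem.Str.upper (PySem.Str.strip day_str)).toList.length _ [] le_rfl ?_).trans ?_
      · intro c hc
        have : c ∈ PySem.Chars.upper (PySem.Str.strip day_str).toList := by
          simpa [PySem.Str.toList_upper] using hc
        simp only [PySem.Chars.upper, List.mem_map] at this
        obtain ⟨x, -, rfl⟩ := this
        exact pv_upperChar_ne x
      · simp [PySem.Str.replace, pvRep]
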